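-- pv_equiv track=rewrite | github.com/pypi-data/pypi-mirror-395 | packages/elemental-xenon/elemental_xenon-1.1.0-py3-none-any.whl/xenon/formatting.py | preserve_formatting
-- ===== SOURCE A (Python) =====
-- def preserve_formatting(xml_string: str) -> str:
--     """
--     Normalize formatting while preserving intentional structure.
--
--     This is useful when you want to clean up messy LLM output
--     without completely reformatting it.
--
--     Args:
--         xml_string: XML to normalize
--
--     Returns:
--         Normalized XML
--     """
--     # Normalize line endings
--     result = xml_string.replace("\r\n", "\n").replace("\r", "\n")
--
--     # Remove trailing whitespace from each line
--     lines = [line.rstrip() for line in result.split("\n")]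
--
--     # Remove excess blank lines (max 1 blank line)
--     normalized_lines = []
--     prev_blank = False
--
--     for line in lines:
--         is_blank = not line.strip()
--         if is_blank and prev_blank:
--             continue  # Skip consecutive blank lines
--         normalized_lines.append(line)
--         prev_blank = is_blank
--
--     return "\n".join(normalized_lines)
-- ===== SOURCE B (Python) =====
-- def preserve_formatting(xml_string: str) -> str:
--     # A blank line is dropped exactly when its predecessor is also blank, so a
--     # stateless pairwise zip-filter replaces the prev_blank accumulator loop.
--     text = xml_string.replace("\r\n", "\n").replace("\r", "\n")
--     lines = [line.rstrip() for line in text.split("\n")]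
--     kept = lines[:1] + [cur for prev, cur in zip(lines, lines[1:]) if cur != "" or prev != ""]
--     return "\n".join(kept)
-- ===== Notes on version B (the rewrite author's own statement) =====
-- stated objective: simpler
-- what changed: B replaces A's stateful prev_blank loop by a stateless pairwise comprehension: a line is kept iff it or its predecessor is non-blank, computed from zip(lines, lines[1:]).
import Mathlib
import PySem

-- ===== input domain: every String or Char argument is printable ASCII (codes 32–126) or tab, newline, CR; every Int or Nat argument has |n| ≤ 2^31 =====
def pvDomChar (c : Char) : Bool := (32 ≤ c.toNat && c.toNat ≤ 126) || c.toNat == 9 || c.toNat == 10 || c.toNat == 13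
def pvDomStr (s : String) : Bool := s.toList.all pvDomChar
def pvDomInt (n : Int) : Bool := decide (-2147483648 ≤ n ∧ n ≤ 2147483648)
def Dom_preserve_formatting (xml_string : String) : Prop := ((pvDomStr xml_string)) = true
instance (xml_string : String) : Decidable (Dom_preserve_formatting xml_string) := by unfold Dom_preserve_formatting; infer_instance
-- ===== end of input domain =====

-- B drops a blank line exactly when its predecessor is blank, via a stateless pairwise zip-filter instead of A's prev_blank loop; simpler decomposition, same cost.

-- ===== PORT A =====
-- A's for-loop over lines with the prev_blank flag, building normalized_lines
def pfA_go : List String → Bool → List String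
  | [], _ => []
  | l :: ls, prev =>
    let isBlank : Bool := PySem.Str.strip l == ""
    if isBlank && prev then pfA_go ls prev
    else l :: pfA_go ls isBlank

def preserve_formatting (xml_string : String) : String :=
  let result := PySem.Str.replace (PySem.Str.replace xml_string "\r\n" "\n") "\r" "\n"
  let lines := ((PySem.Str.split? result "\n").getD []).map PySem.Str.rstrip
  PySem.Str.join "\n" (pfA_go lines false)

-- ===== PORT B =====
def preserve_formatting_alt (xml_string : String) : String :=
  let text := PySem.Str.replace (PySem.Str.replace xml_string "\r\n" "\n") "\r" "\n"
  let lines := ((PySem.Str.split? text "\n").getD []).map PySem.Str.rstrip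
  -- lines[:1] + [cur for prev, cur in zip(lines, lines[1:]) if cur != "" or prev != ""]
  let kept := lines.take 1 ++
    (((lines.zip lines.tail).filter (fun p => p.2 != "" || p.1 != "")).map Prod.snd)
  PySem.Str.join "\n" kept

-- ===== PRECONDITION & SPEC =====
def Spec_preserve_formatting (xml_string : String) (out : String) : Prop := out = preserve_formatting_alt xml_string
instance (xml_string : String) (out : String) : Decidable (Spec_preserve_formatting xml_string out) := by unfold Spec_preserve_formatting; infer_instance

-- ===== CLAIM (what is proved, stated in full; the proofs are below) =====
def Claim_equal_preserve_formatting : Prop := ∀ (xml_string : String), Dom_preserve_formatting xml_string → Spec_preserve_formatting xml_string (preserve_formatting xml_string)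

-- ===== LEMMAS AND PROOFS =====

-- a line is all-whitespace iff its rstrip is empty
theorem chars_rstrip_nil_iff (cs : List Char) :
    PySem.Chars.rstrip cs = [] ↔ ∀ x ∈ cs, PySem.Chars.isspace x := by
  simp [PySem.Chars.rstrip, List.dropWhile_eq_nil_iff]

theorem chars_strip_nil_iff (cs : List Char) :
    PySem.Chars.strip cs = [] ↔ PySem.Chars.rstrip cs = [] := by
  rw [PySem.Chars.strip, chars_rstrip_nil_iff, chars_rstrip_nil_iff, PySem.Chars.lstrip]
  constructor
  · intro h x hx
    rw [← List.takeWhile_append_dropWhile (p := PySem.Chars.isspace) (l := cs)] at hx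
    rcases List.mem_append.mp hx with h1 | h2
    · exact List.mem_takeWhile_imp h1
    · exact h x h2
  · intro h x hx
    exact h x (List.Sublist.subset (List.dropWhile_sublist _) hx)

-- an rstripped line whose characters are all whitespace is empty
theorem rstrip_self_blank (cs : List Char)
    (h : ∀ x ∈ PySem.Chars.rstrip cs, PySem.Chars.isspace x) : PySem.Chars.rstrip cs = [] := by
  unfold PySem.Chars.rstrip at *
  rcases hd : List.dropWhile PySem.Chars.isspace cs.reverse with _ | ⟨a, t⟩
  · simp
  · exfalso
    have hfalse := List.head?_dropWhile_not PySem.Chars.isspace cs.reverse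
    rw [hd] at hfalse
    have ha : PySem.Chars.isspace a := h a (by simp [hd])
    simp_all

-- on an rstripped line, A's blank test (strip == "") equals B's (== "")
theorem blank_test_eq (x : String) :
    ((PySem.Str.strip (PySem.Str.rstrip x) == "") : Bool) = ((PySem.Str.rstrip x == "") : Bool) := by
  rw [Bool.eq_iff_iff]
  simp only [beq_iff_eq, ← String.toList_eq_nil_iff, PySem.Str.strip, PySem.Str.rstrip,
    String.toList_ofList]
  constructor
  · intro h
    exact rstrip_self_blank _ (((chars_strip_nil_iff _).trans (chars_rstrip_nil_iff _)).mp h)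
  · intro h
    rw [h]
    simp [PySem.Chars.strip, PySem.Chars.rstrip, PySem.Chars.lstrip]

-- A's flag loop, started after processing line `prev`, equals B's pairwise filter over zip (prev :: ls) ls
theorem go_eq_zip (ls : List String) (prev : String)
    (H : ∀ l ∈ ls, ((PySem.Str.strip l == "") : Bool) = ((l == "") : Bool)) :
    pfA_go ls (prev == "") =
      (((prev :: ls).zip ls).filter (fun p => p.2 != "" || p.1 != "")).map Prod.snd := by
  induction ls generalizing prev with
  | nil => simp [pfA_go]
  | cons x ls ih =>
    have hx := H x (by simp)
    have ih' := ih x (fun l hl => H l (List.mem_cons_of_mem _ hl))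
    rw [pfA_go]
    simp only [hx, List.zip_cons_cons, List.filter_cons]
    by_cases hxe : x = ""
    · subst hxe
      have ih'' : pfA_go ls true =
          List.map Prod.snd (List.filter (fun p => p.2 != "" || p.1 != "") ((("" : String) :: ls).zip ls)) := by
        simpa using ih'
      by_cases hpe : prev = "" <;> simp [hpe, ih'']
    · simp [hxe, ih']

-- ===== VERDICT (by name: the statement is the Claim_ definition above) =====
theorem preserve_formatting_spec : Claim_equal_preserve_formatting := by
  intro s _
  show preserve_formatting s = preserve_formatting_alt s
  simp only [preserve_formatting, preserve_formatting_alt]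
  have H : ∀ l ∈ (((PySem.Str.split? (PySem.Str.replace (PySem.Str.replace s "\r\n" "\n") "\r" "\n") "\n").getD []).map PySem.Str.rstrip),
      ((PySem.Str.strip l == "") : Bool) = ((l == "") : Bool) := by
    intro l hl
    rcases List.mem_map.mp hl with ⟨x, _, rfl⟩
    exact blank_test_eq x
  rcases hls : (((PySem.Str.split? (PySem.Str.replace (PySem.Str.replace s "\r\n" "\n") "\r" "\n") "\n").getD []).map PySem.Str.rstrip) with _ | ⟨l, ls⟩
  · simp [pfA_go]
  · rw [hls] at H
    have hl := H l (by simp)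
    rw [pfA_go]
    simp only [hl, Bool.and_false, if_neg Bool.false_ne_true]
    rw [go_eq_zip ls l (fun x hx => H x (List.mem_cons_of_mem _ hx))]
    simp
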